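-- pv_equiv track=rewrite | github.com/gcuijpers/MRI-scheduling | CRS1.py | perf_eval
-- ===== SOURCE A (Python) =====
-- def perf_eval(schedule, patients):
--     lateness = []
--     overtime = []
--     idletime = []
--     scan_sum = 0
--     time = 8
--
--     for i in range(len(schedule)):
--         lateness.append(max(0, time - schedule[i][1])) # if early, lateness = 0
--         scan_sum += patients[i][2]
--         time = max(time, schedule[i][1]) + patients[i][2]
--
--         if i == len(schedule) -1:
--             break
--         if(schedule[i+1][1] == 8): # new day
--             overtime.append(max(0, time - 17)) # overtime if time after last finish > 17
--             idletime.append(max(0, 9 - scan_sum + overtime[-1])) # idle time on day = length of day (incl. overtime) - sum of scan durations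
--             scan_sum = 0
--             time = 8
--
--     return lateness, overtime, idletime
-- ===== SOURCE B (Python) =====
-- def perf_eval(schedule, patients):
--     # two-phase: split the zipped schedule/patient stream into day chunks, then score each chunk
--     pairs = list(zip(schedule, patients))
--     days = []
--     cur = []
--     for p in pairs:
--         if cur and p[0][1] == 8:
--             days.append(cur)
--             cur = []
--         cur.append(p)
--     if cur:
--         days.append(cur)
--     lateness, overtime, idletime = [], [], []
--     for d, day in enumerate(days):
--         time, scan_sum = 8, 0
--         for (s, q) in day:
--             lateness.append(max(0, time - s[1]))
--             scan_sum += q[2]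
--             time = max(time, s[1]) + q[2]
--         if d != len(days) - 1:
--             ot = max(0, time - 17)
--             overtime.append(ot)
--             idletime.append(max(0, 9 - scan_sum + ot))
--     return lateness, overtime, idletime
-- ===== Notes on version B (the rewrite author's own statement) =====
-- stated objective: alternative
-- what changed: B replaces A's single index loop with a lookahead-based in-loop day reset by a two-phase pass: first split the zipped schedule/patient stream into day chunks (new chunk at each start time 8), then score each chunk independently, closing every chunk but the last.
import Mathlib
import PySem

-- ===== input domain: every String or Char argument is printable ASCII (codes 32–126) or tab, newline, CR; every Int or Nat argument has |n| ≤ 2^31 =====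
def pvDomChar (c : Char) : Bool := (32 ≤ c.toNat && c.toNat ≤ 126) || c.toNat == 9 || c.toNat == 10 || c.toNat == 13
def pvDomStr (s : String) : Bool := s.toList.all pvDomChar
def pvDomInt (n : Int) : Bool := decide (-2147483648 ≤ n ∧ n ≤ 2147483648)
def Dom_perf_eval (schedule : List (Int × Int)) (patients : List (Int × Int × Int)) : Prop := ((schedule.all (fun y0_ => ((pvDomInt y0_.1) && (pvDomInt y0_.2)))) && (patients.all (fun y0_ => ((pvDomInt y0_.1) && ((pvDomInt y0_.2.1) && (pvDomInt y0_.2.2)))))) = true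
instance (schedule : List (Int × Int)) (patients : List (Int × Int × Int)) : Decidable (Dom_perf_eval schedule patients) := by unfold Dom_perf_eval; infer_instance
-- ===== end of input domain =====

-- B replaces A's single index loop with lookahead by a two-phase pass (split into day
-- chunks, then score each chunk); objective: simpler decomposition, same cost.

abbrev PvPair : Type := (Int × Int) × (Int × Int × Int)

-- ===== PORT A =====
-- the for-i loop of A: state (lateness, overtime, idletime, scan_sum, time); the 'break'
-- at i == len-1 only skips the new-day check of the last iteration
def perfA_go (schedule : List (Int × Int)) (patients : List (Int × Int × Int))
    (i : Nat) (lat ot idl : List Int) (scan time : Int) : List Int × List Int × List Int :=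
  if h : i < schedule.length then
    let s := PySem.List.pyGetD schedule (i : Int) (0, 0)
    let p := PySem.List.pyGetD patients (i : Int) (0, 0, 0)
    let lat' := lat ++ [max 0 (time - s.2)]
    let scan' := scan + p.2.2
    let time' := max time s.2 + p.2.2
    if i = schedule.length - 1 then (lat', ot, idl)
    else if (PySem.List.pyGetD schedule ((i : Int) + 1) (0, 0)).2 = 8 then
      let o := max 0 (time' - 17)
      perfA_go schedule patients (i + 1) lat' (ot ++ [o]) (idl ++ [max 0 (9 - scan' + o)]) 0 8
    else
      perfA_go schedule patients (i + 1) lat' ot idl scan' time'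
  else (lat, ot, idl)
termination_by schedule.length - i

def perf_eval (schedule : List (Int × Int)) (patients : List (Int × Int × Int)) : List Int × List Int × List Int :=
  perfA_go schedule patients 0 [] [] [] 0 8

-- ===== PORT B =====
-- phase 1 step: start a new day chunk when a patient is scheduled at 8 (unless first)
def buildStep (acc : List (List PvPair) × List PvPair) (p : PvPair) : List (List PvPair) × List PvPair :=
  if acc.2 ≠ [] ∧ p.1.2 = 8 then (acc.1 ++ [acc.2], [p]) else (acc.1, acc.2 ++ [p])

-- phase 2 inner step: state (lateness, scan_sum, time)
def dayStep (st : List Int × Int × Int) (sq : PvPair) : List Int × Int × Int :=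
  (st.1 ++ [max 0 (st.2.2 - sq.1.2)], st.2.1 + sq.2.2.2, max st.2.2 sq.1.2 + sq.2.2.2)

-- phase 2 outer step over enumerate(days): score one day, close it unless it is the last
def dayClose (n : Int) (acc : List Int × List Int × List Int) (dday : Int × List PvPair) : List Int × List Int × List Int :=
  let inner := dday.2.foldl dayStep (acc.1, 0, 8)
  if dday.1 ≠ n - 1 then
    let o := max 0 (inner.2.2 - 17)
    (inner.1, acc.2.1 ++ [o], acc.2.2 ++ [max 0 (9 - inner.2.1 + o)])
  else (inner.1, acc.2.1, acc.2.2)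

def perf_eval_alt (schedule : List (Int × Int)) (patients : List (Int × Int × Int)) : List Int × List Int × List Int :=
  let pairs := schedule.zip patients
  let st := pairs.foldl buildStep ([], [])
  let days := if st.2 = [] then st.1 else st.1 ++ [st.2]
  (PySem.List.enumerate days 0).foldl (dayClose (days.length : Int)) ([], [], [])

-- ===== PRECONDITION & SPEC =====
-- A indexes patients[i] for every i < len(schedule): it raises IndexError when patients is shorter
def Pre_perf_eval (schedule : List (Int × Int)) (patients : List (Int × Int × Int)) : Prop :=
  schedule.length ≤ patients.length
instance (schedule : List (Int × Int)) (patients : List (Int × Int × Int)) : Decidable (Pre_perf_eval schedule patients) := by unfold Pre_perf_eval; infer_instance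

def pvWitness_perf_eval : (List (Int × Int)) × (List (Int × Int × Int)) := ([(1, 8), (2, 9)], [(1, 0, 3), (2, 0, 2)])

def Spec_perf_eval (schedule : List (Int × Int)) (patients : List (Int × Int × Int)) (out : List Int × List Int × List Int) : Prop := out = perf_eval_alt schedule patients
instance (schedule : List (Int × Int)) (patients : List (Int × Int × Int)) (out : List Int × List Int × List Int) : Decidable (Spec_perf_eval schedule patients out) := by unfold Spec_perf_eval; infer_instance

-- ===== CLAIM (what is proved, stated in full; the proofs are below) =====
def Claim_equal_perf_eval : Prop := ∀ (schedule : List (Int × Int)) (patients : List (Int × Int × Int)), Dom_perf_eval schedule patients → Pre_perf_eval schedule patients → Spec_perf_eval schedule patients (perf_eval schedule patients)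
-- ===== LEMMAS AND PROOFS =====

-- list-structural form of A's loop (lookahead on the head of the remainder)
def listGo : List PvPair → List Int → List Int → List Int → Int → Int → List Int × List Int × List Int
  | [], lat, ot, idl, _, _ => (lat, ot, idl)
  | sq :: rest, lat, ot, idl, scan, time =>
    let lat' := lat ++ [max 0 (time - sq.1.2)]
    let scan' := scan + sq.2.2.2
    let time' := max time sq.1.2 + sq.2.2.2
    match rest with
    | [] => (lat', ot, idl)
    | sq2 :: _ =>
      if sq2.1.2 = 8 then
        let o := max 0 (time' - 17)
        listGo rest lat' (ot ++ [o]) (idl ++ [max 0 (9 - scan' + o)]) 0 8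
      else listGo rest lat' ot idl scan' time'

-- recursive chunking: a day is its first patient plus the following non-8 starts
def chunksOf : List PvPair → List (List PvPair)
  | [] => []
  | p :: rest =>
    (p :: rest.takeWhile (fun q => q.1.2 != 8)) :: chunksOf (rest.dropWhile (fun q => q.1.2 != 8))
termination_by l => l.length
decreasing_by
  simp only [List.length_cons]
  have := List.length_dropWhile_le (fun q : PvPair => q.1.2 != 8) rest
  omega

-- the in-progress chunk of B's builder, run to the end
def consume (cur : List PvPair) : List PvPair → List (List PvPair)
  | [] => [cur]
  | p :: r => if p.1.2 = 8 then cur :: consume [p] r else consume (cur ++ [p]) r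

-- recursive form of B's phase 2
def phase2R : List (List PvPair) → List Int → List Int → List Int → List Int × List Int × List Int
  | [], lat, ot, idl => (lat, ot, idl)
  | d :: rest, lat, ot, idl =>
    let inner := d.foldl dayStep (lat, 0, 8)
    match rest with
    | [] => (inner.1, ot, idl)
    | _ :: _ =>
      let o := max 0 (inner.2.2 - 17)
      phase2R rest inner.1 (ot ++ [o]) (idl ++ [max 0 (9 - inner.2.1 + o)])

theorem perfA_go_eq_listGo (schedule : List (Int × Int)) (patients : List (Int × Int × Int))
    (hlen : schedule.length ≤ patients.length) :
    ∀ (i : Nat) (lat ot idl : List Int) (scan time : Int),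
      perfA_go schedule patients i lat ot idl scan time
        = listGo ((schedule.zip patients).drop i) lat ot idl scan time := by
  intro i lat ot idl scan time
  fun_induction perfA_go schedule patients i lat ot idl scan time with
  | case1 lat ot idl scan time h s lat' =>
    have hp : schedule.length - 1 < patients.length := by omega
    have hiz : schedule.length - 1 < (schedule.zip patients).length := by simp; omega
    have hz : (schedule.zip patients).drop (schedule.length - 1)
        = [(schedule[schedule.length - 1]'h, patients[schedule.length - 1]'hp)] := by
      rw [← List.getElem_cons_drop hiz]
      have h1 : schedule.length - 1 + 1 = schedule.length := by omega
      have h2 : (schedule.zip patients).drop (schedule.length - 1 + 1) = [] :=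
        List.drop_eq_nil_of_le (by simp; omega)
      simp [List.getElem_zip, h2]
    have hs : PySem.List.pyGetD schedule ((schedule.length - 1 : Nat) : Int) (0, 0)
        = schedule[schedule.length - 1]'h := by
      simp [PySem.List.pyGetD_natCast, List.getElem?_eq_getElem h]
    rw [hz]
    simp only [lat', s, listGo, hs]
  | case2 i lat ot idl scan time h s p lat' scan' time' hlast h8 o ih =>
    have hp : i < patients.length := by omega
    have hi1 : i + 1 < schedule.length := by omega
    have hp1 : i + 1 < patients.length := by omega
    have hiz : i < (schedule.zip patients).length := by simp; omega
    have hiz1 : i + 1 < (schedule.zip patients).length := by simp; omega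
    have hz1 : (schedule.zip patients).drop (i + 1)
        = (schedule[i+1], patients[i+1]) :: (schedule.zip patients).drop (i + 2) := by
      rw [← List.getElem_cons_drop hiz1]; simp [List.getElem_zip]
    have hz : (schedule.zip patients).drop i
        = (schedule[i], patients[i]) :: ((schedule[i+1], patients[i+1]) :: (schedule.zip patients).drop (i + 2)) := by
      rw [← List.getElem_cons_drop hiz, ← hz1]
      simp [List.getElem_zip]
    have hs : PySem.List.pyGetD schedule ((i : Nat) : Int) (0, 0) = schedule[i] := by
      simp [PySem.List.pyGetD_natCast, List.getElem?_eq_getElem h]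
    have hq : PySem.List.pyGetD patients ((i : Nat) : Int) (0, 0, 0) = patients[i] := by
      simp [PySem.List.pyGetD_natCast, List.getElem?_eq_getElem hp]
    have hs1 : PySem.List.pyGetD schedule ((i : Int) + 1) (0, 0) = schedule[i + 1] := by
      rw [PySem.List.pyGetD_eq_getElem schedule (0, 0) (by omega) (by omega)]
      simp only [show ((i : Int) + 1).toNat = i + 1 from by omega]
    have h8' : schedule[i+1].2 = 8 := by rw [← hs1]; exact h8
    simp only [o, time', scan', lat', p, s] at ih ⊢
    rw [ih, hz, hz1]
    simp [listGo, hs, hq, h8']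
  | case3 i lat ot idl scan time h s p lat' scan' time' hlast h8 ih =>
    have hp : i < patients.length := by omega
    have hi1 : i + 1 < schedule.length := by omega
    have hp1 : i + 1 < patients.length := by omega
    have hiz : i < (schedule.zip patients).length := by simp; omega
    have hiz1 : i + 1 < (schedule.zip patients).length := by simp; omega
    have hz1 : (schedule.zip patients).drop (i + 1)
        = (schedule[i+1], patients[i+1]) :: (schedule.zip patients).drop (i + 2) := by
      rw [← List.getElem_cons_drop hiz1]; simp [List.getElem_zip]
    have hz : (schedule.zip patients).drop i
        = (schedule[i], patients[i]) :: ((schedule[i+1], patients[i+1]) :: (schedule.zip patients).drop (i + 2)) := by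
      rw [← List.getElem_cons_drop hiz, ← hz1]
      simp [List.getElem_zip]
    have hs : PySem.List.pyGetD schedule ((i : Nat) : Int) (0, 0) = schedule[i] := by
      simp [PySem.List.pyGetD_natCast, List.getElem?_eq_getElem h]
    have hq : PySem.List.pyGetD patients ((i : Nat) : Int) (0, 0, 0) = patients[i] := by
      simp [PySem.List.pyGetD_natCast, List.getElem?_eq_getElem hp]
    have hs1 : PySem.List.pyGetD schedule ((i : Int) + 1) (0, 0) = schedule[i + 1] := by
      rw [PySem.List.pyGetD_eq_getElem schedule (0, 0) (by omega) (by omega)]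
      simp only [show ((i : Int) + 1).toNat = i + 1 from by omega]
    have h8' : ¬ schedule[i+1].2 = 8 := by rw [← hs1]; exact h8
    simp only [time', scan', lat', p, s] at ih ⊢
    rw [ih, hz, hz1]
    simp [listGo, hs, hq, h8']
  | case4 i lat ot idl scan time h =>
    have hd : (schedule.zip patients).drop i = [] := by
      apply List.drop_eq_nil_of_le; simp; omega
    rw [hd]
    simp [listGo]

theorem build_consume (l : List PvPair) :
    ∀ (days : List (List PvPair)) (cur : List PvPair), cur ≠ [] →
      (let st := l.foldl buildStep (days, cur);
       if st.2 = [] then st.1 else st.1 ++ [st.2]) = days ++ consume cur l := by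
  induction l with
  | nil => intro days cur hc; simp [consume, hc]
  | cons p r ih =>
    intro days cur hc
    simp only [List.foldl_cons]
    by_cases h8 : p.1.2 = 8
    · rw [show buildStep (days, cur) p = (days ++ [cur], [p]) from by simp [buildStep, hc, h8]]
      rw [ih (days ++ [cur]) [p] (by simp)]
      simp [consume, h8]
    · rw [show buildStep (days, cur) p = (days, cur ++ [p]) from by simp [buildStep, h8]]
      rw [ih days (cur ++ [p]) (by simp)]
      simp [consume, h8]

theorem consume_chunks (l : List PvPair) :
    ∀ (cur : List PvPair),
      consume cur l = (cur ++ l.takeWhile (fun q => q.1.2 != 8)) :: chunksOf (l.dropWhile (fun q => q.1.2 != 8)) := by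
  induction l with
  | nil => intro cur; simp [consume, chunksOf]
  | cons p r ih =>
    intro cur
    by_cases h8 : p.1.2 = 8
    · simp only [consume, if_pos h8, ih [p], List.takeWhile_cons, List.dropWhile_cons,
        show (p.1.2 != 8) = false from by simp [h8]]
      conv_rhs => rw [chunksOf.eq_def]
      simp
    · simp only [consume, if_neg h8, ih (cur ++ [p]), List.takeWhile_cons, List.dropWhile_cons,
        show (p.1.2 != 8) = true from by simp [h8]]
      simp

theorem buildDays_eq_chunksOf (pairs : List PvPair) :
    (let st := pairs.foldl buildStep ([], []);
     if st.2 = [] then st.1 else st.1 ++ [st.2]) = chunksOf pairs := by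
  cases pairs with
  | nil => simp [chunksOf]
  | cons p r =>
    simp only [List.foldl_cons]
    rw [show buildStep ([], []) p = ([], [p]) from by simp [buildStep]]
    rw [build_consume r [] [p] (by simp), consume_chunks r [p]]
    conv_rhs => rw [chunksOf.eq_def]
    simp

theorem enum_fold_eq_phase2R (ds : List (List PvPair)) :
    ∀ (s : Int) (lat ot idl : List Int) (n : Int), n = s + ds.length →
      (PySem.List.enumerate ds s).foldl (dayClose n) (lat, ot, idl) = phase2R ds lat ot idl := by
  induction ds with
  | nil => intro s lat ot idl n hn; simp [PySem.List.enumerate_nil, phase2R]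
  | cons d rest ih =>
    intro s lat ot idl n hn
    rw [PySem.List.enumerate_cons]
    simp only [List.foldl_cons]
    cases rest with
    | nil =>
      have hs : ¬ s ≠ n - 1 := by simp at hn; omega
      simp [dayClose, hs, PySem.List.enumerate_nil, phase2R]
    | cons d2 r2 =>
      have hs : s ≠ n - 1 := by simp at hn; omega
      rw [show dayClose n (lat, ot, idl) (s, d) =
            (let inner := d.foldl dayStep (lat, 0, 8);
             let o := max 0 (inner.2.2 - 17);
             (inner.1, ot ++ [o], idl ++ [max 0 (9 - inner.2.1 + o)]))
          from by simp [dayClose, hs]]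
      rw [ih (s + 1) _ _ _ n (by simp at hn ⊢; omega)]
      simp [phase2R]

theorem listGo_day (t : List PvPair) :
    ∀ (p : PvPair) (rest : List PvPair) (lat ot idl : List Int) (scan time : Int),
      (∀ x ∈ t, ¬ x.1.2 = 8) → (∀ y rest', rest = y :: rest' → y.1.2 = 8) →
      listGo ((p :: t) ++ rest) lat ot idl scan time
        = (let inner := (p :: t).foldl dayStep (lat, scan, time)
           match rest with
           | [] => (inner.1, ot, idl)
           | _ :: _ =>
             let o := max 0 (inner.2.2 - 17)
             listGo rest inner.1 (ot ++ [o]) (idl ++ [max 0 (9 - inner.2.1 + o)]) 0 8) := by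
  induction t with
  | nil =>
    intro p rest lat ot idl scan time _ hrest
    cases rest with
    | nil => simp [listGo, dayStep]
    | cons y r' =>
      have hy : y.1.2 = 8 := hrest y r' rfl
      simp [listGo, dayStep, hy]
  | cons x t' ih =>
    intro p rest lat ot idl scan time ht hrest
    have hx : ¬ x.1.2 = 8 := ht x (by simp)
    have step1 : listGo ((p :: x :: t') ++ rest) lat ot idl scan time
        = listGo ((x :: t') ++ rest) (lat ++ [max 0 (time - p.1.2)]) ot idl
            (scan + p.2.2.2) (max time p.1.2 + p.2.2.2) := by
      simp [listGo, hx]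
    rw [step1, ih x rest _ ot idl _ _ (fun z hz => ht z (by simp [hz])) hrest]
    simp [List.foldl_cons, dayStep]

theorem dropWhile_head_false {c : PvPair → Bool} (l : List PvPair) :
    ∀ y ys, l.dropWhile c = y :: ys → c y = false := by
  induction l with
  | nil => intro y ys h; simp [List.dropWhile] at h
  | cons a l' ih =>
    intro y ys h
    by_cases hc : c a
    · exact ih y ys (by simpa [List.dropWhile_cons, hc] using h)
    · rw [List.dropWhile_cons, if_neg (by simp [hc])] at h
      cases h
      simpa using hc

theorem listGo_eq_phase2R_fuel (N : Nat) :
    ∀ (l : List PvPair), l.length ≤ N →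
      ∀ (lat ot idl : List Int), listGo l lat ot idl 0 8 = phase2R (chunksOf l) lat ot idl := by
  induction N with
  | zero =>
    intro l hl lat ot idl
    have : l = [] := List.eq_nil_of_length_eq_zero (by omega)
    subst this
    simp [listGo, chunksOf.eq_def, phase2R]
  | succ N ihN =>
    intro l hl lat ot idl
    cases l with
    | nil => simp [listGo, chunksOf.eq_def, phase2R]
    | cons p r =>
      have ht : ∀ x ∈ r.takeWhile (fun q : PvPair => q.1.2 != 8), ¬ x.1.2 = 8 := by
        intro x hx
        have := List.mem_takeWhile_imp hx
        simpa using this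
      have hrest : ∀ y rest', r.dropWhile (fun q : PvPair => q.1.2 != 8) = y :: rest' → y.1.2 = 8 := by
        intro y rest' hy
        have := dropWhile_head_false r y rest' hy
        simpa using this
      conv_lhs => rw [show p :: r
          = (p :: r.takeWhile (fun q : PvPair => q.1.2 != 8)) ++ r.dropWhile (fun q : PvPair => q.1.2 != 8)
        from by rw [List.cons_append, List.takeWhile_append_dropWhile]]
      rw [listGo_day _ p _ lat ot idl 0 8 ht hrest]
      rw [chunksOf.eq_def]
      cases hd : r.dropWhile (fun q : PvPair => q.1.2 != 8) with
      | nil => simp only [hd]; simp [phase2R, chunksOf.eq_def]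
      | cons y ys =>
        have hlen : (y :: ys).length ≤ N := by
          have h1 := List.length_dropWhile_le (fun q : PvPair => q.1.2 != 8) r
          rw [hd] at h1
          simp at hl
          omega
        simp only [hd]
        rw [ihN (y :: ys) hlen]
        rw [chunksOf.eq_def]
        simp [phase2R]

theorem listGo_eq_phase2R (l : List PvPair) :
    ∀ (lat ot idl : List Int), listGo l lat ot idl 0 8 = phase2R (chunksOf l) lat ot idl :=
  listGo_eq_phase2R_fuel l.length l le_rfl

-- ===== VERDICT (by name: the statement is the Claim_ definition above) =====
theorem perf_eval_spec : Claim_equal_perf_eval := by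
  intro schedule patients _ hpre
  unfold Spec_perf_eval perf_eval perf_eval_alt
  rw [perfA_go_eq_listGo schedule patients hpre 0, List.drop_zero,
      listGo_eq_phase2R, ← buildDays_eq_chunksOf]
  rw [enum_fold_eq_phase2R _ 0 _ _ _ _ (by simp)]
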